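-- pv_equiv track=rewrite | github.com/sujungeee/python-programmers | practice/19-1.py | solution
-- ===== SOURCE A (Python) =====
-- def hashValue(query):
--     p = 31
--     m = 1_000_000_007
--     n=0
--     hashValue= 0
--     for s in query:
--         hashValue += (ord(s)-96)*(p**n)
--         n+= 1
--         hashValue= hashValue % m
--
--     return hashValue
--
-- def solution(string_list, query_list):
--     answer= ['False']*(len(query_list))
--
--     dict1 = {}
--
--     for query in query_list:
--         dict1[hashValue(query)]= query
--
--     for string in string_list:
--         if hashValue(string) in dict1:
--            answer[query_list.index(string)]= 'True'
--
--     return answer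
-- ===== SOURCE B (Python) =====
-- def solution(string_list, query_list):
--     present = set(string_list)
--     seen = set()
--     answer = []
--     for q in query_list:
--         answer.append('True' if q in present and q not in seen else 'False')
--         seen.add(q)
--     return answer
-- ===== Notes on version B (the rewrite author's own statement) =====
-- stated objective: faster
-- what changed: B replaces A's rolling-hash dict, repeated O(L^2) hashing with p**n, and the O(Q) query_list.index scan per string by a single pass over query_list with two hash sets (strings present, queries already seen), appending the answer directly.
-- outside the precondition, e.g. on solution(['a`'], ['a']): A raises ValueError, B returns ['False']
import Mathlib
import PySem

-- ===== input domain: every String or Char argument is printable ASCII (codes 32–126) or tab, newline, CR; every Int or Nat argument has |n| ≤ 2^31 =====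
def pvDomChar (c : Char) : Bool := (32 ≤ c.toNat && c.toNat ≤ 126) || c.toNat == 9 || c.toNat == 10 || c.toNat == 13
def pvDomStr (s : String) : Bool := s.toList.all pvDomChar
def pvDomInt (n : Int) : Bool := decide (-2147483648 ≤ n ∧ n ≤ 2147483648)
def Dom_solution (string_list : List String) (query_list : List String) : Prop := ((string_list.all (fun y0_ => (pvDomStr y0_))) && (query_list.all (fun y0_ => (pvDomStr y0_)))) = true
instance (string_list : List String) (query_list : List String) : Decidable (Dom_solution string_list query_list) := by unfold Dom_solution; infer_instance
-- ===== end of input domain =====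

-- B replaces A's rolling-hash dict and per-string query_list.index scan by one pass over
-- query_list with two sets; return value only (neither version mutates its arguments).

-- ===== PORT A =====
def hashValue (query : String) : Int :=
  (query.toList.foldl
    (fun (st : Nat × Int) s =>
      (st.1 + 1, PySem.Int.mod (st.2 + ((s.toNat : Int) - 96) * 31 ^ st.1) 1000000007))
    (0, 0)).2

def solution (string_list : List String) (query_list : List String) : List String :=
  let answer := List.replicate query_list.length "False"
  let dict1 : PySem.Dict Int String :=
    query_list.foldl (fun d query => d.insert (hashValue query) query) PySem.Dict.empty
  string_list.foldl
    (fun ans string =>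
      if dict1.contains (hashValue string) then
        match PySem.List.index? query_list string with
        | some i => ans.set i "True"
        | none => ans   -- Python raises ValueError here; excluded by Pre_solution
      else ans)
    answer

-- ===== PORT B =====
def solution_alt (string_list : List String) (query_list : List String) : List String :=
  let present := PySem.Set.ofList string_list
  (query_list.foldl
    (fun (st : PySem.Set String × List String) q =>
      (st.1.add q,
       st.2 ++ [if present.contains q && !(st.1.contains q) then "True" else "False"]))
    (PySem.Set.empty, [])).2

-- ===== PRECONDITION & SPEC =====
-- Pre_ excludes exactly the inputs on which Python A raises ValueError: a string that is
-- not itself a query but whose rolling hash collides with some query's hash.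
def Pre_solution (string_list : List String) (query_list : List String) : Prop :=
  ∀ s ∈ string_list, s ∉ query_list → hashValue s ∉ query_list.map hashValue

instance (string_list : List String) (query_list : List String) : Decidable (Pre_solution string_list query_list) := by
  unfold Pre_solution; infer_instance

def pvWitness_solution : List String × List String := (["ab", "xx"], ["ab", "cd", "ab"])

def Spec_solution (string_list : List String) (query_list : List String) (out : List String) : Prop := out = solution_alt string_list query_list
instance (string_list : List String) (query_list : List String) (out : List String) : Decidable (Spec_solution string_list query_list out) := by unfold Spec_solution; infer_instance

-- ===== CLAIM (what is proved, stated in full; the proofs are below) =====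
def Claim_equal_solution : Prop := ∀ (string_list : List String) (query_list : List String), Dom_solution string_list query_list → Pre_solution string_list query_list → Spec_solution string_list query_list (solution string_list query_list)


-- ===== LEMMAS AND PROOFS =====

-- ---- B side: recursive description of B's loop output ----
def bres (present seen : PySem.Set String) : List String → List String
  | [] => []
  | q :: rest =>
      (if present.contains q && !(seen.contains q) then "True" else "False")
        :: bres present (seen.add q) rest

theorem foldl_bres (present : PySem.Set String) (qs : List String)
    (seen : PySem.Set String) (acc : List String) :
    (qs.foldl
      (fun (st : PySem.Set String × List String) q =>
        (st.1.add q,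
         st.2 ++ [if present.contains q && !(st.1.contains q) then "True" else "False"]))
      (seen, acc)).2 = acc ++ bres present seen qs := by
  induction qs generalizing seen acc with
  | nil => simp [bres]
  | cons q rest ih =>
    rw [List.foldl_cons]
    exact (ih (seen.add q)
      (acc ++ [if present.contains q && !(seen.contains q) then "True" else "False"])).trans
      (by simp [bres])

theorem length_bres (present seen : PySem.Set String) (qs : List String) :
    (bres present seen qs).length = qs.length := by
  induction qs generalizing seen with
  | nil => rfl
  | cons q rest ih => simp [bres, ih]

theorem getElem_bres (present seen : PySem.Set String) (qs : List String)
    (i : Nat) (hi : i < qs.length) :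
    (bres present seen qs)[i]'(by simpa [length_bres] using hi)
      = if qs[i] ∈ present ∧ qs[i] ∉ seen ∧ qs[i] ∉ qs.take i then "True" else "False" := by
  induction qs generalizing seen i with
  | nil => simp at hi
  | cons q rest ih =>
    cases i with
    | zero =>
      simp only [bres, List.getElem_cons_zero, List.take_zero, List.not_mem_nil,
        not_false_iff, and_true]
      by_cases h1 : q ∈ present <;> by_cases h2 : q ∈ seen <;>
        simp [h1, h2]
    | succ j =>
      have hj : j < rest.length := by simpa using hi
      simp only [bres, List.getElem_cons_succ]
      rw [ih (seen.add q) j hj]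
      simp only [List.take_succ_cons, List.mem_cons, PySem.Set.mem_add]
      by_cases hq : rest[j] = q <;> simp [hq]

-- ---- A side ----
def dictA (query_list : List String) : PySem.Dict Int String :=
  query_list.foldl (fun d query => d.insert (hashValue query) query) PySem.Dict.empty

theorem containsA (query_list : List String) (k : Int) :
    (dictA query_list).contains k = true ↔ k ∈ query_list.map hashValue := by
  unfold dictA
  rw [PySem.Dict.contains_iff_mem_keys,
    PySem.Dict.keys_foldl_insert_key query_list hashValue _ PySem.Dict.empty]
  simp [PySem.Dict.keys_empty, PySem.Set.mem_update]

def aStep (d : PySem.Dict Int String) (ql : List String)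
    (ans : List String) (s : String) : List String :=
  if d.contains (hashValue s) then
    match PySem.List.index? ql s with
    | some i => ans.set i "True"
    | none => ans
  else ans

theorem aStep_length (d : PySem.Dict Int String) (ql : List String)
    (ans : List String) (s : String) :
    (aStep d ql ans s).length = ans.length := by
  unfold aStep
  split
  · split <;> simp
  · rfl

theorem setloop_get? (d : PySem.Dict Int String) (ql : List String)
    (ss : List String) (ans : List String) (hlen : ql.length ≤ ans.length) (i : Nat) :
    (ss.foldl (aStep d ql) ans)[i]?
      = if ∃ s ∈ ss, d.contains (hashValue s) = true ∧ PySem.List.index? ql s = some i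
        then some "True" else ans[i]? := by
  induction ss generalizing ans with
  | nil => simp
  | cons s rest ih =>
    rw [List.foldl_cons, ih (aStep d ql ans s) (by rw [aStep_length]; exact hlen)]
    by_cases hex : ∃ t ∈ rest, d.contains (hashValue t) = true ∧ PySem.List.index? ql t = some i
    · obtain ⟨t, ht, hp⟩ := hex
      rw [if_pos ⟨t, ht, hp⟩, if_pos ⟨t, List.mem_cons_of_mem _ ht, hp⟩]
    · rw [if_neg hex]
      unfold aStep
      by_cases hc : d.contains (hashValue s) = true
      · rw [if_pos hc]
        cases hidx : PySem.List.index? ql s with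
        | none =>
          rw [if_neg]
          rintro ⟨t, ht, hct, hit⟩
          rcases List.mem_cons.mp ht with rfl | ht'
          · rw [hidx] at hit; cases hit
          · exact hex ⟨t, ht', hct, hit⟩
        | some j =>
          by_cases hji : j = i
          · subst hji
            have hjlt : j < ql.length := by
              obtain ⟨hk, -, -⟩ := PySem.List.getElem_of_index?_eq_some hidx
              exact hk
            rw [if_pos ⟨s, List.mem_cons_self .., hc, hidx⟩]
            rw [List.getElem?_set_self]
            simp [Nat.lt_of_lt_of_le hjlt hlen]
          · rw [List.getElem?_set_ne hji, if_neg]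
            rintro ⟨t, ht, hct, hit⟩
            rcases List.mem_cons.mp ht with rfl | ht'
            · rw [hidx] at hit; exact hji (Option.some.inj hit)
            · exact hex ⟨t, ht', hct, hit⟩
      · rw [if_neg hc, if_neg]
        rintro ⟨t, ht, hct, hit⟩
        rcases List.mem_cons.mp ht with rfl | ht'
        · exact hc hct
        · exact hex ⟨t, ht', hct, hit⟩

-- the redundant dict test: index success already implies a hash hit
theorem exists_drop_contains (sl ql : List String) (i : Nat) :
    (∃ s ∈ sl, (dictA ql).contains (hashValue s) = true ∧ PySem.List.index? ql s = some i)
      ↔ ∃ s ∈ sl, PySem.List.index? ql s = some i := by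
  constructor
  · rintro ⟨s, hs, -, hidx⟩; exact ⟨s, hs, hidx⟩
  · rintro ⟨s, hs, hidx⟩
    refine ⟨s, hs, ?_, hidx⟩
    have hmem : s ∈ ql := by
      have := PySem.List.index?_isSome_iff (xs := ql) (v := s)
      rw [hidx] at this; simpa using this
    exact (containsA ql (hashValue s)).mpr (List.mem_map_of_mem hmem)

-- A's marking condition at index i equals B's first-occurrence condition
theorem bridge (sl ql : List String) (i : Nat) (hi : i < ql.length) :
    (∃ s ∈ sl, PySem.List.index? ql s = some i)
      ↔ ql[i] ∈ sl ∧ ql[i] ∉ ql.take i := by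
  constructor
  · rintro ⟨s, hs, hidx⟩
    obtain ⟨hk, heq, hfirst⟩ := PySem.List.getElem_of_index?_eq_some hidx
    refine ⟨heq ▸ hs, fun hmem => ?_⟩
    rw [List.mem_iff_getElem] at hmem
    obtain ⟨j, hjlen, hj⟩ := hmem
    have hji : j < i := by simpa using (by simpa [List.length_take] using hjlen : j < min i ql.length).trans_le (Nat.min_le_left _ _) |>.trans_le (le_refl i) |>.trans_eq rfl
    have : ql[j] = ql[i] := by rw [← hj, List.getElem_take]
    exact hfirst j hji (this.trans heq)
  · rintro ⟨hmem, hnt⟩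
    refine ⟨ql[i], hmem, ?_⟩
    rw [PySem.List.index?_eq_some_iff]
    refine ⟨ql.take i, ql.drop (i + 1), ?_, ?_, hnt⟩
    · conv_lhs => rw [← List.take_append_drop i ql]
      rw [List.getElem_cons_drop]
    · simp [List.length_take, Nat.le_of_lt hi]

-- ===== VERDICT (by name: the statement is the Claim_ definition above) =====
theorem solution_spec : Claim_equal_solution := by
  intro sl ql _ _
  unfold Spec_solution
  have hA : solution sl ql = sl.foldl (aStep (dictA ql) ql) (List.replicate ql.length "False") := rfl
  have hB : solution_alt sl ql = bres (PySem.Set.ofList sl) PySem.Set.empty ql := by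
    unfold solution_alt
    rw [foldl_bres]
    rfl
  rw [hA, hB]
  apply List.ext_getElem?
  intro i
  rw [setloop_get? (dictA ql) ql sl _ (by simp) i]
  by_cases hi : i < ql.length
  · have hRB : (bres (PySem.Set.ofList sl) PySem.Set.empty ql)[i]?
        = some (if ql[i] ∈ (PySem.Set.ofList sl : PySem.Set String) ∧
            ql[i] ∉ (PySem.Set.empty : PySem.Set String) ∧ ql[i] ∉ ql.take i
          then "True" else "False") := by
      rw [List.getElem?_eq_getElem (by simpa [length_bres] using hi),
        getElem_bres (PySem.Set.ofList sl) PySem.Set.empty ql i hi]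
    rw [hRB]
    simp only [exists_drop_contains, bridge sl ql i hi]
    have hnm : ql[i] ∉ (PySem.Set.empty : PySem.Set String) := by
      simp [PySem.Set.empty]
    by_cases hcond : ql[i] ∈ sl ∧ ql[i] ∉ ql.take i
    · rw [if_pos hcond, if_pos ⟨by simpa [PySem.Set.mem_ofList] using hcond.1, hnm, hcond.2⟩]
    · rw [if_neg hcond, if_neg (by
        rintro ⟨h1, -, h3⟩
        exact hcond ⟨by simpa [PySem.Set.mem_ofList] using h1, h3⟩)]
      rw [List.getElem?_eq_getElem (by simpa using hi), List.getElem_replicate]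
  · have hi' : ¬ i < ql.length := hi
    rw [if_neg (by
      rintro ⟨s, -, -, hidx⟩
      obtain ⟨hk, -, -⟩ := PySem.List.getElem_of_index?_eq_some hidx
      exact hi' hk)]
    rw [List.getElem?_eq_none (by simpa using Nat.le_of_not_lt hi'),
      List.getElem?_eq_none (by simpa [length_bres] using Nat.le_of_not_lt hi')]
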